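-- pv_equiv track=rewrite | github.com/xuxpp/Python-3-exercise | 3-2D-Array/7/2d-array.py | get_non_perfect_nums
-- ===== SOURCE A (Python) =====
-- def is_perfect(n):
--     sum = 0
--     for i in range(1, n):
--         if n % i == 0: sum += i
--
--     return sum == n
--
-- def get_non_perfect_nums(cnt):
--     l = []
--     n = 1
--     while len(l) != cnt:
--         if not is_perfect(n):
--             l.append(n)
--         n += 1
--     return l
-- ===== SOURCE B (Python) =====
-- def _is_perfect_fast(n):
--     # divisor-sum via sqrt factor pairing: O(sqrt(n)) instead of O(n)
--     if n < 2:
--         return False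
--     s = 1
--     i = 2
--     while i * i <= n:
--         if n % i == 0:
--             s += i
--             j = n // i
--             if j != i:
--                 s += j
--         i += 1
--     return s == n
--
-- def get_non_perfect_nums(cnt):
--     res = []
--     n = 1
--     while len(res) < cnt:
--         if not _is_perfect_fast(n):
--             res.append(n)
--         n += 1
--     return res
-- ===== Notes on version B (the rewrite author's own statement) =====
-- stated objective: faster
-- what changed: The perfection test now computes the proper-divisor sum by pairing divisors up to sqrt(n) (adding i and n//i together) instead of trial-dividing by every smaller i, so collecting cnt non-perfect numbers drops from O(cnt*N) to O(cnt*sqrt(N)) divisions; Pre_ excludes negative cnt, on which A's while loop never terminates.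
import Mathlib
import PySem

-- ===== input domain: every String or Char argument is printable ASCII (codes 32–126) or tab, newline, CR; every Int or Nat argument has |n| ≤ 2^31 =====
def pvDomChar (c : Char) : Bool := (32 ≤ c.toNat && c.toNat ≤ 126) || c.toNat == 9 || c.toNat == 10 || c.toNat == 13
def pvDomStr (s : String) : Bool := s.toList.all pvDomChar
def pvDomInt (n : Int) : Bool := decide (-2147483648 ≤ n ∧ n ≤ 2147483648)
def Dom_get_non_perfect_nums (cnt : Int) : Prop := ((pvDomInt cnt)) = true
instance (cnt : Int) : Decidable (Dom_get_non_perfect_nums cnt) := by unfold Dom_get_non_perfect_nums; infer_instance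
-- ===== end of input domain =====

-- B replaces A's linear trial-division perfection test by a sqrt-bounded divisor-pairing sum; return values agree for every nonnegative cnt (A diverges on negative cnt).

-- ===== PORT A =====
-- is_perfect: sum of i in range(1,n) dividing n, compared with n
def is_perfect (n : Int) : Bool :=
  ((PySem.List.pyRange 1 n 1).foldl
      (fun s i => if PySem.Int.mod n i = 0 then s + i else s) 0) == n

-- the while-loop of A; fuel only makes the recursion total (the loop body is unchanged)
def npLoopA (fuel : Nat) (cnt : Int) (l : List Int) (n : Int) : List Int :=
  match fuel with
  | 0 => l
  | fuel + 1 =>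
    if (l.length : Int) = cnt then l
    else npLoopA fuel cnt (if !is_perfect n then l ++ [n] else l) (n + 1)

def get_non_perfect_nums (cnt : Int) : List Int :=
  npLoopA (2 ^ cnt.toNat) cnt [] 1

-- ===== PORT B =====
-- the while i*i <= n loop of _is_perfect_fast
def fastLoop (n i s : Int) : Int :=
  if i * i ≤ n then
    fastLoop n (i + 1)
      (if PySem.Int.mod n i = 0 then
        s + i + (if PySem.Int.floordiv n i ≠ i then PySem.Int.floordiv n i else 0)
       else s)
  else s
termination_by (n + 1 - i).toNat
decreasing_by
  have hin : i ≤ n := by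
    by_cases hi : 0 < i
    · nlinarith
    · nlinarith [mul_self_nonneg i]
  omega

def is_perfect_fast (n : Int) : Bool :=
  if n < 2 then false
  else fastLoop n 2 1 == n

-- the while-loop of B; fuel only makes the recursion total
def npLoopB (fuel : Nat) (cnt : Int) (res : List Int) (n : Int) : List Int :=
  match fuel with
  | 0 => res
  | fuel + 1 =>
    if cnt ≤ (res.length : Int) then res
    else npLoopB fuel cnt (if !is_perfect_fast n then res ++ [n] else res) (n + 1)

def get_non_perfect_nums_alt (cnt : Int) : List Int :=
  npLoopB (2 ^ cnt.toNat) cnt [] 1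

-- ===== PRECONDITION & SPEC =====
-- Pre_ excludes negative cnt: there the Python A's while loop never terminates.
def Pre_get_non_perfect_nums (cnt : Int) : Prop := 0 ≤ cnt
instance (cnt : Int) : Decidable (Pre_get_non_perfect_nums cnt) := by
  unfold Pre_get_non_perfect_nums; infer_instance

def pvWitness_get_non_perfect_nums : Int := 3

def Spec_get_non_perfect_nums (cnt : Int) (out : List Int) : Prop := out = get_non_perfect_nums_alt cnt
instance (cnt : Int) (out : List Int) : Decidable (Spec_get_non_perfect_nums cnt out) := by
  unfold Spec_get_non_perfect_nums; infer_instance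

-- ===== CLAIM (what is proved, stated in full; the proofs are below) =====
def Claim_equal_get_non_perfect_nums : Prop :=
  ∀ (cnt : Int), Dom_get_non_perfect_nums cnt → Pre_get_non_perfect_nums cnt →
    Spec_get_non_perfect_nums cnt (get_non_perfect_nums cnt)

-- ===== LEMMAS AND PROOFS =====

-- A's divisor fold as a Finset sum (over the shifted range)
lemma foldA_range (n : Int) (m : Nat) (s : Int) :
    ((List.range m).map (fun k : Nat => (1 : Int) + (k : Int))).foldl
        (fun s i => if PySem.Int.mod n i = 0 then s + i else s) s
      = s + ∑ k ∈ Finset.range m, (if PySem.Int.mod n (1 + k) = 0 then 1 + (k : Int) else 0) := by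
  induction m generalizing s with
  | zero => simp
  | succ m ih =>
      rw [List.range_succ, List.map_append, List.foldl_append, ih, Finset.sum_range_succ]
      simp only [List.map_cons, List.map_nil, List.foldl_cons, List.foldl_nil]
      split_ifs <;> ring

-- B's fastLoop as a Finset sum
lemma fastLoop_aux (N : Nat) (d : Nat) :
    ∀ i s : Int, 2 ≤ i → Nat.sqrt N + 1 - i.toNat = d →
    fastLoop (N : Int) i s
      = s + ((∑ k ∈ Finset.Ico i.toNat (Nat.sqrt N + 1),
              (if N % k = 0 then k + (if N / k ≠ k then N / k else 0) else 0) : Nat) : Int) := by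
  induction d with
  | zero =>
      intro i s hi hd
      have hIi : ((i.toNat : Int)) = i := Int.toNat_of_nonneg (by omega)
      have hI : Nat.sqrt N < i.toNat := by omega
      have hlt : (N : Int) < i * i := by
        have h1 : N < i.toNat * i.toNat := Nat.sqrt_lt.mp hI
        calc (N : Int) < ((i.toNat * i.toNat : Nat) : Int) := by exact_mod_cast h1
          _ = i * i := by push_cast [hIi]; ring
      rw [fastLoop, if_neg (by omega), Finset.Ico_eq_empty (by omega)]
      simp
  | succ d ih =>
      intro i s hi hd
      obtain ⟨I, rfl⟩ : ∃ I : Nat, i = (I : Int) :=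
        ⟨i.toNat, (Int.toNat_of_nonneg (by omega)).symm⟩
      have hI2 : 2 ≤ I := by exact_mod_cast hi
      rw [Int.toNat_natCast] at hd ⊢
      have hIs : I ≤ Nat.sqrt N := by omega
      have hle : (I : Int) * I ≤ (N : Int) := by exact_mod_cast Nat.le_sqrt.mp hIs
      have hmod : PySem.Int.mod (N : Int) (I : Int) = ((N % I : Nat) : Int) :=
        PySem.Int.mod_natCast N I
      have hdiv : PySem.Int.floordiv (N : Int) (I : Int) = ((N / I : Nat) : Int) :=
        PySem.Int.floordiv_natCast N I
      have hsplit : ∑ k ∈ Finset.Ico I (Nat.sqrt N + 1),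
              (if N % k = 0 then k + (if N / k ≠ k then N / k else 0) else 0)
          = (if N % I = 0 then I + (if N / I ≠ I then N / I else 0) else 0)
            + ∑ k ∈ Finset.Ico (I + 1) (Nat.sqrt N + 1),
              (if N % k = 0 then k + (if N / k ≠ k then N / k else 0) else 0) :=
        Finset.sum_eq_sum_Ico_succ_bot (by omega) _
      have h1 : ((I : Int) + 1) = ((I + 1 : Nat) : Int) := by push_cast; ring
      have h2 : (2 : Int) ≤ ((I + 1 : Nat) : Int) := by push_cast; omega
      have h3 : Nat.sqrt N + 1 - ((I + 1 : Nat) : Int).toNat = d := by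
        rw [Int.toNat_natCast]; omega
      rw [fastLoop, if_pos hle, hsplit]
      by_cases hm : N % I = 0
      · rw [hmod, if_pos (by exact_mod_cast hm), if_pos hm]
        by_cases hne : N / I = I
        · have heq : PySem.Int.floordiv (N : Int) (I : Int) = (I : Int) := by
            rw [hdiv, hne]
          rw [if_neg (by simp [heq]), if_neg (by simp [hne]), h1]
          rw [ih ((I + 1 : Nat) : Int) (s + (I : Int) + 0) h2 h3, Int.toNat_natCast]
          push_cast
          ring
        · have hne' : ((N / I : Nat) : Int) ≠ (I : Int) := by exact_mod_cast hne
          rw [hdiv, if_pos hne', if_pos hne, h1]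
          rw [ih ((I + 1 : Nat) : Int) (s + (I : Int) + ((N / I : Nat) : Int)) h2 h3,
            Int.toNat_natCast]
          push_cast
          ring
      · rw [hmod, if_neg (by exact_mod_cast hm), if_neg hm, h1]
        rw [ih ((I + 1 : Nat) : Int) s h2 h3, Int.toNat_natCast]
        push_cast
        ring

lemma fastLoop_spec (N : Nat) (i s : Int) (hi : 2 ≤ i) :
    fastLoop (N : Int) i s
      = s + ((∑ k ∈ Finset.Ico i.toNat (Nat.sqrt N + 1),
              (if N % k = 0 then k + (if N / k ≠ k then N / k else 0) else 0) : Nat) : Int) :=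
  fastLoop_aux N _ i s hi rfl

-- the sqrt-pairing identity for proper-divisor sums
lemma core_pairing (N : Nat) (hN : 2 ≤ N) :
    (∑ i ∈ Finset.Ico 1 N, if N % i = 0 then i else 0)
      = 1 + ∑ k ∈ Finset.Ico 2 (Nat.sqrt N + 1),
          (if N % k = 0 then k + (if N / k ≠ k then N / k else 0) else 0) := by
  classical
  set D : Finset Nat := (Finset.Ico 1 N).filter (fun i => N % i = 0) with hD
  set T : Finset Nat := (Finset.Ico 2 (Nat.sqrt N + 1)).filter (fun k => N % k = 0) with hT
  set L : Finset Nat := D.filter (fun d => N < d * d) with hL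
  have memT : ∀ k, k ∈ T ↔ 2 ≤ k ∧ k * k ≤ N ∧ N % k = 0 := by
    intro k
    simp only [hT, Finset.mem_filter, Finset.mem_Ico]
    constructor
    · rintro ⟨⟨h2, hk⟩, hm⟩
      exact ⟨h2, Nat.le_sqrt.mp (by omega), hm⟩
    · rintro ⟨h2, hk, hm⟩
      exact ⟨⟨h2, by have := Nat.le_sqrt.mpr hk; omega⟩, hm⟩
  have memL : ∀ d, d ∈ L ↔ 1 ≤ d ∧ d < N ∧ N % d = 0 ∧ N < d * d := by
    intro d
    simp only [hL, hD, Finset.mem_filter, Finset.mem_Ico]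
    tauto
  -- LHS as a sum over the proper divisors D
  have hLHS : (∑ i ∈ Finset.Ico 1 N, if N % i = 0 then i else 0) = ∑ i ∈ D, i := by
    rw [hD, Finset.sum_filter]
  -- 1 is a proper divisor
  have h1D : (1 : Nat) ∈ D := by
    simp only [hD, Finset.mem_filter, Finset.mem_Ico]
    omega
  have hsplit1 : (∑ i ∈ D, i) = 1 + ∑ i ∈ D.erase 1, i :=
    (Finset.add_sum_erase D (fun i => i) h1D).symm
  -- the proper divisors other than 1 split into small (≤ √N) and large (> √N)
  have herase : D.erase 1 = T ∪ L := by
    ext x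
    simp only [Finset.mem_erase, Finset.mem_union, memT x, memL x, hD,
      Finset.mem_filter, Finset.mem_Ico]
    constructor
    · rintro ⟨hne, ⟨h1, hlt⟩, hm⟩
      rcases Nat.lt_or_ge N (x * x) with hxx | hxx
      · exact Or.inr ⟨h1, hlt, hm, hxx⟩
      · exact Or.inl ⟨by omega, hxx, hm⟩
    · rintro (⟨h2, hxx, hm⟩ | ⟨h1, hlt, hm, hxx⟩)
      · have h2x : 2 * x ≤ N := le_trans (Nat.mul_le_mul_right x (by omega)) hxx
        exact ⟨by omega, ⟨by omega, by omega⟩, hm⟩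
      · have : x ≠ 1 := by rintro rfl; omega
        exact ⟨this, ⟨h1, hlt⟩, hm⟩
  have hdisj : Disjoint T L := by
    rw [Finset.disjoint_left]
    intro x hxT hxL
    rw [memT x] at hxT
    rw [memL x] at hxL
    omega
  -- pair each large divisor d with the small divisor N / d
  have hpair : (∑ d ∈ L, d) = ∑ k ∈ T.filter (fun k => N / k ≠ k), N / k := by
    apply Finset.sum_nbij' (i := fun d => N / d) (j := fun e => N / e)
    · intro d hd
      rw [memL d] at hd
      obtain ⟨h1, hlt, hm, hxx⟩ := hd
      have hdvd : d ∣ N := Nat.dvd_of_mod_eq_zero hm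
      have hk : d * (N / d) = N := Nat.mul_div_cancel' hdvd
      have hk0 : N / d ≠ 0 := by rintro h; rw [h, Nat.mul_zero] at hk; omega
      have hk1 : N / d ≠ 1 := by rintro h; rw [h, Nat.mul_one] at hk; omega
      have hkx : N / d < d := by
        rcases Nat.lt_or_ge (N / d) d with h | h
        · exact h
        · exfalso
          have := Nat.mul_le_mul_left d h
          omega
      have hdd : N / (N / d) = d := Nat.div_div_self hdvd (by omega)
      rw [Finset.mem_filter, memT (N / d)]
      refine ⟨⟨Nat.two_le_iff _ |>.mpr ⟨hk0, hk1⟩, ?_, ?_⟩, ?_⟩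
      · calc N / d * (N / d) ≤ d * (N / d) := Nat.mul_le_mul_right _ (le_of_lt hkx)
          _ = N := hk
      · exact Nat.mod_eq_zero_of_dvd ⟨d, (Nat.div_mul_cancel hdvd).symm⟩
      · rw [hdd]
        omega
    · intro e he
      rw [Finset.mem_filter, memT e] at he
      obtain ⟨⟨h2, hee, hm⟩, hne⟩ := he
      have hdvd : e ∣ N := Nat.dvd_of_mod_eq_zero hm
      have hk : e * (N / e) = N := Nat.mul_div_cancel' hdvd
      have hmul : e * e ≤ e * (N / e) := by rw [hk]; exact hee
      have hed : e ≤ N / e := Nat.le_of_mul_le_mul_left hmul (by omega)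
      have hlt : e < N / e := by omega
      have h2d : 2 * (N / e) ≤ N := by
        calc 2 * (N / e) ≤ e * (N / e) := Nat.mul_le_mul_right _ h2
          _ = N := hk
      rw [memL (N / e)]
      refine ⟨by omega, by omega, ?_, ?_⟩
      · exact Nat.mod_eq_zero_of_dvd ⟨e, (Nat.div_mul_cancel hdvd).symm⟩
      · calc N = e * (N / e) := hk.symm
          _ < N / e * (N / e) := (Nat.mul_lt_mul_right (by omega)).mpr hlt
    · intro d hd
      rw [memL d] at hd
      exact Nat.div_div_self (Nat.dvd_of_mod_eq_zero hd.2.2.1) (by omega)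
    · intro e he
      rw [Finset.mem_filter, memT e] at he
      exact Nat.div_div_self (Nat.dvd_of_mod_eq_zero he.1.2.2) (by omega)
    · intro d hd
      rw [memL d] at hd
      exact (Nat.div_div_self (Nat.dvd_of_mod_eq_zero hd.2.2.1) (by omega)).symm
  rw [hLHS, hsplit1, herase, Finset.sum_union hdisj, hpair]
  have hRHS : (∑ k ∈ Finset.Ico 2 (Nat.sqrt N + 1),
        (if N % k = 0 then k + (if N / k ≠ k then N / k else 0) else 0))
      = ∑ k ∈ T, (k + (if N / k ≠ k then N / k else 0)) := by
    rw [hT, Finset.sum_filter]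
  have hTsplit : (∑ k ∈ T, (k + (if N / k ≠ k then N / k else 0)))
      = (∑ k ∈ T, k) + ∑ k ∈ T.filter (fun k => N / k ≠ k), N / k := by
    rw [Finset.sum_add_distrib,
      ← Finset.sum_filter (fun k => N / k ≠ k) (fun k => N / k)]
  rw [hRHS, hTsplit]

-- A's test as a Nat divisor sum
lemma is_perfect_sum (N : Nat) (hN : 2 ≤ N) :
    is_perfect (N : Int)
      = (((∑ i ∈ Finset.Ico 1 N, if N % i = 0 then i else 0 : Nat) : Int) == (N : Int)) := by
  unfold is_perfect
  rw [PySem.List.pyRange_one]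
  have hco : (((N : Int) - 1).toNat) = N - 1 := by omega
  rw [hco, foldA_range, Finset.sum_Ico_eq_sum_range (f := fun i => if N % i = 0 then i else 0)
    (m := 1) (n := N)]
  congr 1
  rw [zero_add, Nat.cast_sum]
  apply Finset.sum_congr rfl
  intro k _
  have hm : PySem.Int.mod (N : Int) (1 + (k : Int)) = ((N % (1 + k) : Nat) : Int) := by
    have h := PySem.Int.mod_natCast N (1 + k)
    push_cast at h ⊢
    exact h
  rw [hm]
  by_cases h : N % (1 + k) = 0
  · rw [if_pos (by exact_mod_cast h), if_pos h]
    push_cast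
    ring
  · rw [if_neg (by exact_mod_cast h), if_neg h]
    simp

-- B's test as a Nat divisor sum
lemma is_perfect_fast_sum (N : Nat) (hN : 2 ≤ N) :
    is_perfect_fast (N : Int)
      = ((1 + ((∑ k ∈ Finset.Ico 2 (Nat.sqrt N + 1),
            (if N % k = 0 then k + (if N / k ≠ k then N / k else 0) else 0) : Nat) : Int))
          == (N : Int)) := by
  unfold is_perfect_fast
  rw [if_neg (by exact_mod_cast (by omega : ¬ ((N : Int) < 2)))]
  rw [fastLoop_spec N 2 1 (by norm_num), show ((2 : Int)).toNat = 2 from rfl]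

-- the two perfection tests agree for n ≥ 1
lemma is_perfect_eq (n : Int) (hn : 1 ≤ n) : is_perfect n = is_perfect_fast n := by
  by_cases h1 : n = 1
  · subst h1
    decide
  · obtain ⟨N, rfl⟩ : ∃ N : Nat, n = (N : Int) :=
      ⟨n.toNat, (Int.toNat_of_nonneg (by omega)).symm⟩
    have hN : 2 ≤ N := by
      have : (1 : Int) ≤ (N : Int) := hn
      have : ((N : Int)) ≠ 1 := h1
      omega
    rw [is_perfect_sum N hN, is_perfect_fast_sum N hN, core_pairing N hN]
    push_cast
    ring_nf

-- the two while-loops agree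
lemma loop_eq (fuel : Nat) (cnt : Int) (l : List Int) (n : Int)
    (hlen : (l.length : Int) ≤ cnt) (hn : 1 ≤ n) :
    npLoopA fuel cnt l n = npLoopB fuel cnt l n := by
  induction fuel generalizing l n with
  | zero => rfl
  | succ fuel ih =>
      simp only [npLoopA, npLoopB]
      rw [is_perfect_eq n hn]
      by_cases h : (l.length : Int) = cnt
      · have h2 : cnt ≤ (l.length : Int) := by omega
        rw [if_pos h, if_pos h2]
      · have h2 : ¬ cnt ≤ (l.length : Int) := by omega
        rw [if_neg h, if_neg h2]
        have hlen' : (((if !is_perfect_fast n then l ++ [n] else l).length : Int)) ≤ cnt := by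
          split_ifs
          · simp only [List.length_append, List.length_cons, List.length_nil]
            push_cast
            omega
          · omega
        exact ih _ _ hlen' (by omega)

-- ===== VERDICT (by name: the statement is the Claim_ definition above) =====
theorem get_non_perfect_nums_spec : Claim_equal_get_non_perfect_nums := by
  intro cnt _ hpre
  unfold Spec_get_non_perfect_nums get_non_perfect_nums get_non_perfect_nums_alt
  exact loop_eq _ cnt [] 1 (by simpa using hpre) le_rfl
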